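-- pv_equiv track=rewrite | github.com/rajrawat2557/daa2026 | daa2026 (2) (1)/daa2026/app.py | parse_cpp_output
-- ===== SOURCE A (Python) =====
-- def parse_cpp_output(output):
--     # Output looks like:
--     # Locations: ...
--     # Source: ... Destination: ...
--     # Congestion used: ... Graph data: ...
--     # [Dijkstra] Cost: ... Nodes explored: ... Path: ...
--     # [A*] Cost: ... Nodes explored: ... Path: ...
--
--     results = {}
--     algo = None
--     for line in output.split("\n"):
--         line = line.strip()
--         if line.startswith("[Dijkstra]"):
--             algo = "Dijkstra"
--             results[algo] = {}
--         elif line.startswith("[A*]"):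
--             algo = "A*"
--             results[algo] = {}
--         elif line.startswith("Cost:") and algo:
--             results[algo]["cost"] = line.replace("Cost:", "").strip()
--         elif line.startswith("Nodes explored:") and algo:
--             results[algo]["nodes"] = line.replace("Nodes explored:", "").strip()
--         elif line.startswith("Path:") and algo:
--             results[algo]["path"] = line.replace("Path:", "").strip()
--     return results
-- ===== SOURCE B (Python) =====
-- def parse_cpp_output(output):
--     # Two-phase: split the stripped lines into marker-delimited sections,
--     # then parse each section's body into its field dict.
--     lines = [l.strip() for l in output.split("\n")]
--     sections = []
--     for line in lines:
--         if line.startswith("[Dijkstra]"):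
--             sections.append(("Dijkstra", []))
--         elif line.startswith("[A*]"):
--             sections.append(("A*", []))
--         elif sections:
--             sections[-1][1].append(line)
--     results = {}
--     for algo, body in sections:
--         results[algo] = _parse_section(body)
--     return results
--
-- _FIELDS = [("Cost:", "cost"), ("Nodes explored:", "nodes"), ("Path:", "path")]
--
-- def _parse_section(body):
--     d = {}
--     for line in body:
--         for prefix, key in _FIELDS:
--             if line.startswith(prefix):
--                 d[key] = line.replace(prefix, "").strip()
--                 break
--     return d
-- ===== Notes on version B (the rewrite author's own statement) =====
-- stated objective: alternative
-- what changed: B replaces A's single stateful elif-chain loop (current-algo variable mutated alongside the results dict) with a two-phase decomposition: first split the stripped lines into marker-delimited sections, then parse each section's body into its field dict via a prefix table.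
import Mathlib
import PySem

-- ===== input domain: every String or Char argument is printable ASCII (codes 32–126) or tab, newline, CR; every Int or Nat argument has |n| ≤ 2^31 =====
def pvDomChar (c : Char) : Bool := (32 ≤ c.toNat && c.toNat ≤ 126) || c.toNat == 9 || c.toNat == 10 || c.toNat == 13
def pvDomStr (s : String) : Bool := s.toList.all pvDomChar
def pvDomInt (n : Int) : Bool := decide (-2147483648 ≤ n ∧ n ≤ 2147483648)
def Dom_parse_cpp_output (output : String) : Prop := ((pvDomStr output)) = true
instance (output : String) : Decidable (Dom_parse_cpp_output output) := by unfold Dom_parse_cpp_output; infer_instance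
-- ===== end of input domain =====

-- B re-decomposes A's stateful elif-chain loop into two phases (split into marker sections, then parse each
-- section via a prefix table); same return value everywhere, objective: alternative decomposition.

-- ===== PORT A =====
-- one loop step of A: strip the line, then the elif chain over (results, algo)
def pvStepA (st : PySem.Dict String (PySem.Dict String String) × Option String) (line0 : String) :
    PySem.Dict String (PySem.Dict String String) × Option String :=
  let line := PySem.Str.strip line0
  if PySem.Str.startswith line "[Dijkstra]" then
    (st.1.insert "Dijkstra" PySem.Dict.empty, some "Dijkstra")
  else if PySem.Str.startswith line "[A*]" then
    (st.1.insert "A*" PySem.Dict.empty, some "A*")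
  else if PySem.Str.startswith line "Cost:" then
    -- 'and algo': algo is None or a nonempty algorithm name, so truthiness = isSome here
    match st.2 with
    | some a => (st.1.modify a PySem.Dict.empty
        (fun d => d.insert "cost" (PySem.Str.strip (PySem.Str.replace line "Cost:" ""))), st.2)
    | none => st
  else if PySem.Str.startswith line "Nodes explored:" then
    match st.2 with
    | some a => (st.1.modify a PySem.Dict.empty
        (fun d => d.insert "nodes" (PySem.Str.strip (PySem.Str.replace line "Nodes explored:" ""))), st.2)
    | none => st
  else if PySem.Str.startswith line "Path:" then
    match st.2 with
    | some a => (st.1.modify a PySem.Dict.empty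
        (fun d => d.insert "path" (PySem.Str.strip (PySem.Str.replace line "Path:" ""))), st.2)
    | none => st
  else st

def parse_cpp_output (output : String) : List (String × List (String × String)) :=
  -- output.split("\n"): sep is the nonempty literal "\n", so split? is always some
  let lines := (PySem.Str.split? output "\n").getD []
  let st := lines.foldl pvStepA (PySem.Dict.empty, none)
  st.1.items.map (fun p => (p.1, p.2.items))

-- ===== PORT B =====
-- sections[-1][1].append(line)
def pvAddLast (secs : List (String × List String)) (line : String) : List (String × List String) :=
  match secs with
  | [] => []
  | [(a, ls)] => [(a, ls ++ [line])]
  | p :: rest => p :: pvAddLast rest line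

-- phase 1: split the (already stripped) lines into marker-delimited sections
def pvStepB (secs : List (String × List String)) (line : String) : List (String × List String) :=
  if PySem.Str.startswith line "[Dijkstra]" then secs ++ [("Dijkstra", [])]
  else if PySem.Str.startswith line "[A*]" then secs ++ [("A*", [])]
  else pvAddLast secs line

def pvFields : List (String × String) :=
  [("Cost:", "cost"), ("Nodes explored:", "nodes"), ("Path:", "path")]

-- inner 'for prefix, key in _FIELDS: … break' of _parse_section
def pvFieldStep (fields : List (String × String)) (d : PySem.Dict String String) (line : String) :
    PySem.Dict String String :=
  match fields with
  | [] => d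
  | (pre, key) :: rest =>
    if PySem.Str.startswith line pre then
      d.insert key (PySem.Str.strip (PySem.Str.replace line pre ""))
    else pvFieldStep rest d line

-- phase 2a: _parse_section
def pvParseSection (body : List String) : PySem.Dict String String :=
  body.foldl (pvFieldStep pvFields) PySem.Dict.empty

def parse_cpp_output_alt (output : String) : List (String × List (String × String)) :=
  -- output.split("\n"): sep is the nonempty literal "\n", so split? is always some
  let lines := ((PySem.Str.split? output "\n").getD []).map PySem.Str.strip
  let secs := lines.foldl pvStepB []
  let results := secs.foldl
    (fun r s => r.insert s.1 (pvParseSection s.2)) PySem.Dict.empty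
  results.items.map (fun p => (p.1, p.2.items))

-- ===== PRECONDITION & SPEC =====
def Spec_parse_cpp_output (output : String) (out : List (String × List (String × String))) : Prop := out = parse_cpp_output_alt output
instance (output : String) (out : List (String × List (String × String))) : Decidable (Spec_parse_cpp_output output out) := by unfold Spec_parse_cpp_output; infer_instance

-- ===== CLAIM (what is proved, stated in full; the proofs are below) =====
def Claim_equal_parse_cpp_output : Prop := ∀ (output : String), Dom_parse_cpp_output output → Spec_parse_cpp_output output (parse_cpp_output output)

-- ===== LEMMAS AND PROOFS =====

-- abstraction of B's phase-2 accumulation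
def pvResultsOf (secs : List (String × List String)) : PySem.Dict String (PySem.Dict String String) :=
  secs.foldl (fun r s => r.insert s.1 (pvParseSection s.2)) PySem.Dict.empty

def pvAlgoOf (secs : List (String × List String)) : Option String :=
  (secs.getLast?).map (·.1)

theorem pvResultsOf_append (secs : List (String × List String)) (s : String × List String) :
    pvResultsOf (secs ++ [s]) = (pvResultsOf secs).insert s.1 (pvParseSection s.2) := by
  simp [pvResultsOf]

theorem pvAddLast_concat (init : List (String × List String)) (a : String) (b : List String) (line : String) :
    pvAddLast (init ++ [(a, b)]) line = init ++ [(a, b ++ [line])] := by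
  induction init with
  | nil => simp [pvAddLast]
  | cons p rest ih =>
    cases rest with
    | nil => simp [pvAddLast]
    | cons q tl =>
      simp only [List.cons_append] at ih ⊢
      rw [show pvAddLast (p :: q :: (tl ++ [(a, b)])) line
            = p :: pvAddLast (q :: (tl ++ [(a, b)])) line from rfl, ih]

theorem pvModify_insert {R : PySem.Dict String (PySem.Dict String String)} {a : String}
    (P : PySem.Dict String String) (f : PySem.Dict String String → PySem.Dict String String) :
    (R.insert a P).modify a PySem.Dict.empty f = R.insert a (f P) := by
  simp [PySem.Dict.modify, PySem.Dict.getD_insert_self, PySem.Dict.insert_insert_self]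

-- one step of A's loop commutes with B's section abstraction
theorem pvStep_comm (secs : List (String × List String)) (line : String) :
    pvStepA (pvResultsOf secs, pvAlgoOf secs) line
      = (pvResultsOf (pvStepB secs (PySem.Str.strip line)), pvAlgoOf (pvStepB secs (PySem.Str.strip line))) := by
  rcases List.eq_nil_or_concat secs with h | ⟨init, ⟨a, b⟩, h⟩ <;> subst h
  · simp only [pvStepA, pvStepB, pvAlgoOf, List.getLast?_nil, Option.map_none]
    split_ifs with h1 h2 h3 h4 h5 <;>
      simp [pvResultsOf, pvParseSection, pvAddLast]
  · simp only [List.concat_eq_append]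
    have halgo : pvAlgoOf (init ++ [(a, b)]) = some a := by
      simp [pvAlgoOf]
    simp only [pvStepA, pvStepB, halgo]
    split_ifs with h1 h2 h3 h4 h5
    · simp only [pvResultsOf_append, pvParseSection, List.foldl_nil]
      simp [pvAlgoOf]
    · simp only [pvResultsOf_append, pvParseSection, List.foldl_nil]
      simp [pvAlgoOf]
    · rw [pvAddLast_concat, pvResultsOf_append, pvResultsOf_append]
      simp only [pvParseSection, List.foldl_append, List.foldl_cons, List.foldl_nil,
        pvFields, pvFieldStep]
      rw [if_pos h3, pvModify_insert]
      simp [pvAlgoOf]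
    · rw [pvAddLast_concat, pvResultsOf_append, pvResultsOf_append]
      simp only [pvParseSection, List.foldl_append, List.foldl_cons, List.foldl_nil,
        pvFields, pvFieldStep]
      rw [if_neg h3, if_pos h4, pvModify_insert]
      simp [pvAlgoOf]
    · rw [pvAddLast_concat, pvResultsOf_append, pvResultsOf_append]
      simp only [pvParseSection, List.foldl_append, List.foldl_cons, List.foldl_nil,
        pvFields, pvFieldStep]
      rw [if_neg h3, if_neg h4, if_pos h5, pvModify_insert]
      simp [pvAlgoOf]
    · rw [pvAddLast_concat, pvResultsOf_append, pvResultsOf_append]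
      simp only [pvParseSection, List.foldl_append, List.foldl_cons, List.foldl_nil,
        pvFields, pvFieldStep]
      rw [if_neg h3, if_neg h4, if_neg h5]
      simp [pvAlgoOf]

theorem pvFold_comm (lines : List String) (secs : List (String × List String)) :
    lines.foldl pvStepA (pvResultsOf secs, pvAlgoOf secs)
      = (pvResultsOf ((lines.map PySem.Str.strip).foldl pvStepB secs),
         pvAlgoOf ((lines.map PySem.Str.strip).foldl pvStepB secs)) := by
  induction lines generalizing secs with
  | nil => simp
  | cons l tl ih =>
    simp only [List.foldl_cons, List.map_cons, pvStep_comm]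
    exact ih _

-- ===== VERDICT (by name: the statement is the Claim_ definition above) =====
theorem parse_cpp_output_spec : Claim_equal_parse_cpp_output := by
  intro output _
  unfold Spec_parse_cpp_output parse_cpp_output parse_cpp_output_alt
  have h := pvFold_comm ((PySem.Str.split? output "\n").getD []) []
  simp only [pvResultsOf, pvAlgoOf, List.foldl_nil, List.getLast?_nil, Option.map_none] at h
  simp only [h]
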